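-- pv_equiv track=rewrite | github.com/huangchink/chink_portfolio | 16bank.py | reconstruct_from_16banks
-- ===== SOURCE A (Python) =====
-- def bank_id(y, x, br=4, bc=4):
--     """回傳 0..15 的 bank 編號；顯示時再 +1 變 1..16。"""
--     return (y % br) * bc + (x % bc)
--
-- def reconstruct_from_16banks(banks, H, W, br=4, bc=4):
--     """把 16 個 bank 依同樣走訪規則還原回 HxW(灰階) 影像，用來驗證。"""
--     img = [[0]*W for _ in range(H)]
--     read_ptr = [0]*len(banks)
--     for y in range(H):
--         for x in range(W):
--             b = bank_id(y, x, br, bc)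
--             img[y][x] = banks[b][read_ptr[b]]
--             read_ptr[b] += 1
--     return img
-- ===== SOURCE B (Python) =====
-- def reconstruct_from_16banks(banks, H, W, br=4, bc=4):
--     # Closed-form per-pixel indexing: no read-pointer array, no mutation.
--     return [[banks[(y % br) * bc + (x % bc)]
--                   [(y // br) * ((W - x % bc + bc - 1) // bc) + x // bc]
--              for x in range(W)] for y in range(H)]
-- ===== Notes on version B (the rewrite author's own statement) =====
-- stated objective: simpler
-- what changed: Replaces the stateful pixel scan with its read_ptr array by a pure nested comprehension that computes each pixel's bank offset in closed form ((y//br)*ceil((W-x%bc)/bc)+x//bc), eliminating all mutation and the per-bank pointer bookkeeping.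
-- outside the precondition, e.g. on reconstruct_from_16banks([[5, 4]], 2, 1, 2, -1): A returns [[5], [4]], B returns [[5], [5]]
import Mathlib
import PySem

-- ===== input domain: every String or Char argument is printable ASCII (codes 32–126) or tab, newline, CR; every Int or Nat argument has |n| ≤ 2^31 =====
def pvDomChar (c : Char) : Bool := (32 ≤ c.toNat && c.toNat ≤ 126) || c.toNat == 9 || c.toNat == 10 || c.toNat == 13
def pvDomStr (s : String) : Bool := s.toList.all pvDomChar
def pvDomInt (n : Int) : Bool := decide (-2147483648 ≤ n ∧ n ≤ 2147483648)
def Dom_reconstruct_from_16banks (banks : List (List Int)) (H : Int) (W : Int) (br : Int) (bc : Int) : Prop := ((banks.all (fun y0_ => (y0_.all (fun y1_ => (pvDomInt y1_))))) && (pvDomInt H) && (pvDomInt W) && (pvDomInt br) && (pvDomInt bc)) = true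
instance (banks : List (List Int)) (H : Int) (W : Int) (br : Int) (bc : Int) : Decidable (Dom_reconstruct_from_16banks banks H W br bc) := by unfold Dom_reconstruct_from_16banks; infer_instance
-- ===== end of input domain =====

-- B replaces A's stateful pixel scan (read_ptr array, in-place assignment) by a pure nested
-- comprehension with a closed-form per-pixel bank offset; same O(H*W) cost, no mutation.
-- Equivalence is about the return value; neither function mutates its arguments.

-- ===== PORT A =====
-- helper `bank_id` of the Python module
def bank_id (y : Int) (x : Int) (br : Int) (bc : Int) : Int :=
  PySem.Int.mod y br * bc + PySem.Int.mod x bc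

-- one iteration of A's inner loop body: state = (img, read_ptr), pixel (y, x).
-- pyGetD/pySetD are exact here: on Pre_ every index b / read_ptr[b] / y / x is in range
-- (Python never raises), and y, x are the nonnegative range(..) values.
def pvStepA (banks : List (List Int)) (br : Int) (bc : Int)
    (st : List (List Int) × List Int) (y : Int) (x : Int) : List (List Int) × List Int :=
  let b := bank_id y x br bc
  let p := PySem.List.pyGetD st.2 b 0
  let v := PySem.List.pyGetD (PySem.List.pyGetD banks b []) p 0
  (PySem.List.pySetD st.1 y (PySem.List.pySetD (PySem.List.pyGetD st.1 y []) x v),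
   PySem.List.pySetD st.2 b (p + 1))

def reconstruct_from_16banks (banks : List (List Int)) (H : Int) (W : Int) (br : Int) (bc : Int) : List (List Int) :=
  -- img = [[0]*W for _ in range(H)]   ([0]*W = [] for W < 0, as List.replicate W.toNat)
  let img : List (List Int) := (PySem.List.pyRange 0 H 1).map (fun _ => List.replicate W.toNat 0)
  -- read_ptr = [0]*len(banks)
  let ptr : List Int := List.replicate banks.length 0
  (((PySem.List.pyRange 0 H 1).foldl (fun st y =>
      (PySem.List.pyRange 0 W 1).foldl (fun st x => pvStepA banks br bc st y x) st)
    (img, ptr))).1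

-- ===== PORT B =====
def reconstruct_from_16banks_alt (banks : List (List Int)) (H : Int) (W : Int) (br : Int) (bc : Int) : List (List Int) :=
  (PySem.List.pyRange 0 H 1).map (fun y =>
    (PySem.List.pyRange 0 W 1).map (fun x =>
      PySem.List.pyGetD
        (PySem.List.pyGetD banks (PySem.Int.mod y br * bc + PySem.Int.mod x bc) [])
        (PySem.Int.floordiv y br *
            PySem.Int.floordiv (W - PySem.Int.mod x bc + bc - 1) bc
          + PySem.Int.floordiv x bc) 0))

-- ===== PRECONDITION & SPEC =====
-- pvCnt d n c = number of k < n with k % d = c (for c < d): used to state how many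
-- pixels bank b must provide.
def pvCnt (d : Nat) (n : Nat) (c : Nat) : Nat := (n + d - 1 - c) / d

-- Pre_ excludes, for a non-empty image (H > 0 and W > 0) only:
-- (a) non-positive bank-grid dimensions br, bc — outside the natural domain;
-- A's behaviour there (ZeroDivisionError, or negative bank ids resolved by negative-index
-- wraparound) is accidental — and (b) bank lists too few or too short for the pixels they
-- must supply, on which A raises IndexError.
def Pre_reconstruct_from_16banks (banks : List (List Int)) (H : Int) (W : Int) (br : Int) (bc : Int) : Prop :=
  (0 < H ∧ 0 < W) →
    (0 < br ∧ 0 < bc ∧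
     (min H.toNat br.toNat - 1) * bc.toNat + (min W.toNat bc.toNat - 1) < banks.length ∧
     ∀ b ∈ List.range banks.length,
       (b < br.toNat * bc.toNat ∧ ((b / bc.toNat : Nat) : Int) < H ∧ ((b % bc.toNat : Nat) : Int) < W) →
         pvCnt br.toNat H.toNat (b / bc.toNat) * pvCnt bc.toNat W.toNat (b % bc.toNat)
           ≤ (banks.getD b []).length)
instance (banks : List (List Int)) (H : Int) (W : Int) (br : Int) (bc : Int) : Decidable (Pre_reconstruct_from_16banks banks H W br bc) := by unfold Pre_reconstruct_from_16banks; infer_instance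

def pvWitness_reconstruct_from_16banks : List (List Int) × Int × Int × Int × Int :=
  ([[1, 3], [2, 4]], 2, 2, 2, 1)

def Spec_reconstruct_from_16banks (banks : List (List Int)) (H : Int) (W : Int) (br : Int) (bc : Int) (out : List (List Int)) : Prop := out = reconstruct_from_16banks_alt banks H W br bc
instance (banks : List (List Int)) (H : Int) (W : Int) (br : Int) (bc : Int) (out : List (List Int)) : Decidable (Spec_reconstruct_from_16banks banks H W br bc out) := by unfold Spec_reconstruct_from_16banks; infer_instance

-- ===== CLAIM (what is proved, stated in full; the proofs are below) =====
def Claim_equal_reconstruct_from_16banks : Prop := ∀ (banks : List (List Int)) (H : Int) (W : Int) (br : Int) (bc : Int), Dom_reconstruct_from_16banks banks H W br bc → Pre_reconstruct_from_16banks banks H W br bc → Spec_reconstruct_from_16banks banks H W br bc (reconstruct_from_16banks banks H W br bc)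

-- ===== LEMMAS AND PROOFS =====

theorem pvWitness_ok :
    Dom_reconstruct_from_16banks (pvWitness_reconstruct_from_16banks.1) (pvWitness_reconstruct_from_16banks.2.1) (pvWitness_reconstruct_from_16banks.2.2.1) (pvWitness_reconstruct_from_16banks.2.2.2.1) (pvWitness_reconstruct_from_16banks.2.2.2.2) ∧
    Pre_reconstruct_from_16banks (pvWitness_reconstruct_from_16banks.1) (pvWitness_reconstruct_from_16banks.2.1) (pvWitness_reconstruct_from_16banks.2.2.1) (pvWitness_reconstruct_from_16banks.2.2.2.1) (pvWitness_reconstruct_from_16banks.2.2.2.2) := by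
  constructor <;> decide

-- ---- generic small facts ----

theorem pv_div_small (d t : Nat) (hd : 0 < d) (h2 : t < 2 * d) :
    t / d = if t < d then 0 else 1 := by
  split
  · exact Nat.div_eq_of_lt ‹_›
  · have ht : t = (t - d) + d := by omega
    rw [ht, Nat.add_div_right _ hd, Nat.div_eq_of_lt (by omega)]

theorem pvCnt_zero (d c : Nat) (hc : c < d) : pvCnt d 0 c = 0 := by
  unfold pvCnt; exact Nat.div_eq_of_lt (by omega)

theorem pvCnt_succ (d n c : Nat) (hd : 0 < d) (hc : c < d) :
    pvCnt d (n + 1) c = pvCnt d n c + (if n % d = c then 1 else 0) := by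
  have hn := Nat.div_add_mod n d
  have hs : n % d < d := Nat.mod_lt _ hd
  set q := n / d with hq
  set s := n % d with hsdef
  have e1 : n + 1 + d - 1 - c = d * q + (s + d - 1 - c + 1) := by omega
  have e2 : n + d - 1 - c = d * q + (s + d - 1 - c) := by omega
  unfold pvCnt
  rw [e1, e2, Nat.mul_add_div hd, Nat.mul_add_div hd,
      pv_div_small d _ hd (by omega), pv_div_small d _ hd (by omega)]
  split_ifs <;> omega

theorem pvCnt_self (d n : Nat) (hd : 0 < d) : pvCnt d n (n % d) = n / d := by
  have hn := Nat.div_add_mod n d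
  have hs : n % d < d := Nat.mod_lt _ hd
  have e : n + d - 1 - n % d = d * (n / d) + (d - 1) := by omega
  unfold pvCnt
  rw [e, Nat.mul_add_div hd, Nat.div_eq_of_lt (Nat.sub_lt hd Nat.one_pos)]
  omega

theorem pv_set_map_range {α : Type} (f : Nat → α) (n i : Nat) (v : α) (_h : i < n) :
    ((List.range n).map f).set i v = (List.range n).map (fun k => if k = i then v else f k) := by
  apply List.ext_getElem (by simp)
  intro k _h1 _h2
  simp only [List.getElem_set, List.getElem_map, List.getElem_range]
  by_cases hk : i = k
  · simp [hk]
  · simp [hk, Ne.symm hk]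

theorem pv_foldl_range' {σ : Type} (g : σ → Nat → σ) (S : Nat → σ) :
    ∀ (len start : Nat), (∀ k, start ≤ k → k < start + len → g (S k) k = S (k + 1)) →
      (List.range' start len).foldl g (S start) = S (start + len) := by
  intro len
  induction len with
  | zero => intro start _; simp
  | succ m ih =>
    intro start hstep
    rw [List.range'_succ]
    simp only [List.foldl_cons]
    rw [hstep start (le_refl _) (by omega)]
    have := ih (start + 1) (fun k hk1 hk2 => hstep k (by omega) (by omega))
    rw [this]; ring_nf

-- ---- the model: value of pixel (y, x), and the invariant states ----

def pvVal (banks : List (List Int)) (R C Wn y x : Nat) : Int :=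
  (banks.getD (y % R * C + x % C) []).getD (y / R * pvCnt C Wn (x % C) + x / C) 0

-- image after r full rows and j pixels of row r
def pvImg (banks : List (List Int)) (R C Hn Wn r j : Nat) : List (List Int) :=
  (List.range Hn).map (fun y =>
    if y < r then (List.range Wn).map (fun x => pvVal banks R C Wn y x)
    else if y = r then (List.range Wn).map (fun x => if x < j then pvVal banks R C Wn y x else 0)
    else List.replicate Wn 0)

def pvPtrVal (R C Wn r j b : Nat) : Int :=
  if b < R * C then
    ((pvCnt R r (b / C) * pvCnt C Wn (b % C)
      + (if b / C = r % R then pvCnt C j (b % C) else 0) : Nat) : Int)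
  else 0

def pvPtr (R C Wn L r j : Nat) : List Int :=
  (List.range L).map (fun b => pvPtrVal R C Wn r j b)

theorem pvPtrVal_succ_j (R C Wn r j b : Nat) (hR : 0 < R) (hC : 0 < C) :
    pvPtrVal R C Wn r (j + 1) b
      = pvPtrVal R C Wn r j b + (if b = r % R * C + j % C then 1 else 0) := by
  have hrR : r % R < R := Nat.mod_lt _ hR
  have hjC : j % C < C := Nat.mod_lt _ hC
  have hb' : r % R * C + j % C < R * C := by
    calc r % R * C + j % C < r % R * C + C := by omega
    _ = (r % R + 1) * C := by ring
    _ ≤ R * C := Nat.mul_le_mul_right _ (by omega)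
  unfold pvPtrVal
  by_cases hb : b < R * C
  · by_cases he : b = r % R * C + j % C
    · have hdiv : b / C = r % R := by
        rw [he, Nat.mul_comm (r % R) C, Nat.mul_add_div hC, Nat.div_eq_of_lt hjC]
        omega
      have hmod : b % C = j % C := by
        rw [he, Nat.mul_comm (r % R) C, Nat.mul_add_mod, Nat.mod_mod_of_dvd _ (dvd_refl C)]
      rw [if_pos hb, if_pos hb, hdiv, hmod, if_pos rfl, if_pos rfl, if_pos he,
          pvCnt_succ C j (j % C) hC hjC, if_pos rfl]
      push_cast; ring
    · rw [if_pos hb, if_pos hb, if_neg he, add_zero]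
      congr 1
      by_cases hg : b / C = r % R
      · have hbC : b % C < C := Nat.mod_lt _ hC
        have hne : ¬ (j % C = b % C) := by
          intro hq
          apply he
          have hb2 : b = C * (b / C) + b % C := (Nat.div_add_mod b C).symm
          rw [hb2, hg, ← hq, Nat.mul_comm]
        rw [if_pos hg, if_pos hg, pvCnt_succ C j (b % C) hC hbC, if_neg hne, add_zero]
      · rw [if_neg hg, if_neg hg]
  · rw [if_neg hb, if_neg hb]
    have hne : ¬ (b = r % R * C + j % C) := by
      intro he; rw [he] at hb; exact hb hb'
    rw [if_neg hne, add_zero]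

theorem pv_step (banks : List (List Int)) (R C Hn Wn r j : Nat)
    (hR : 0 < R) (hC : 0 < C) (hr : r < Hn) (hj : j < Wn) :
    pvStepA banks (R : Int) (C : Int)
        (pvImg banks R C Hn Wn r j, pvPtr R C Wn banks.length r j) (r : Int) (j : Int)
      = (pvImg banks R C Hn Wn r (j + 1), pvPtr R C Wn banks.length r (j + 1)) := by
  have hrR : r % R < R := Nat.mod_lt _ hR
  have hjC : j % C < C := Nat.mod_lt _ hC
  have hB : r % R * C + j % C < R * C := by
    calc r % R * C + j % C < r % R * C + C := by omega
    _ = (r % R + 1) * C := by ring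
    _ ≤ R * C := Nat.mul_le_mul_right _ (by omega)
  have hdivB : (r % R * C + j % C) / C = r % R := by
    rw [Nat.mul_comm (r % R) C, Nat.mul_add_div hC, Nat.div_eq_of_lt hjC]
    omega
  have hmodB : (r % R * C + j % C) % C = j % C := by
    rw [Nat.mul_comm (r % R) C, Nat.mul_add_mod, Nat.mod_mod_of_dvd _ (dvd_refl C)]
  simp only [pvStepA, bank_id, PySem.Int.mod_natCast]
  have hcast : ((r % R : Nat) : Int) * (C : Int) + ((j % C : Nat) : Int)
      = ((r % R * C + j % C : Nat) : Int) := by push_cast; ring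
  rw [hcast]
  set B := r % R * C + j % C with hBdef
  -- read_ptr[B] and the value banks[B][read_ptr[B]]
  have hptrlen : (pvPtr R C Wn banks.length r j).length = banks.length := by
    unfold pvPtr; simp
  have hval : PySem.List.pyGetD
      (PySem.List.pyGetD banks (B : Int) [])
      (PySem.List.pyGetD (pvPtr R C Wn banks.length r j) (B : Int) 0) 0
      = pvVal banks R C Wn r j := by
    rw [PySem.List.pyGetD_natCast, PySem.List.pyGetD_natCast]
    by_cases hL : B < banks.length
    · unfold pvPtr
      rw [PySem.List.getD_map_range _ _ _ _ hL]
      unfold pvPtrVal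
      rw [if_pos hB, hdivB, hmodB, if_pos rfl, pvCnt_self R r hR, pvCnt_self C j hC,
          PySem.List.pyGetD_natCast]
      unfold pvVal
      rw [← hBdef]
    · have h1 : (pvPtr R C Wn banks.length r j).getD B 0 = 0 :=
        List.getD_eq_default _ _ (by omega)
      have h2 : banks.getD B [] = [] := List.getD_eq_default _ _ (by omega)
      rw [h1, h2]
      unfold pvVal
      rw [← hBdef, h2]
      simp [PySem.List.pyGetD_zero]
  rw [hval]
  -- image component
  have himg : PySem.List.pySetD (pvImg banks R C Hn Wn r j) (r : Int)
      (PySem.List.pySetD (PySem.List.pyGetD (pvImg banks R C Hn Wn r j) (r : Int) []) (j : Int)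
        (pvVal banks R C Wn r j))
      = pvImg banks R C Hn Wn r (j + 1) := by
    rw [PySem.List.pySetD_natCast, PySem.List.pySetD_natCast, PySem.List.pyGetD_natCast]
    unfold pvImg
    rw [PySem.List.getD_map_range _ _ _ _ hr, if_neg (lt_irrefl r), if_pos rfl,
        pv_set_map_range _ _ _ _ hj]
    have hrow : (List.range Wn).map
          (fun x => if x = j then pvVal banks R C Wn r j
                    else if x < j then pvVal banks R C Wn r x else 0)
        = (List.range Wn).map (fun x => if x < j + 1 then pvVal banks R C Wn r x else 0) := by
      apply List.map_congr_left; intro x _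
      rcases lt_trichotomy x j with h | h | h
      · rw [if_neg (by omega), if_pos h, if_pos (by omega)]
      · subst h; rw [if_pos rfl, if_pos (by omega)]
      · rw [if_neg (by omega), if_neg (by omega), if_neg (by omega)]
    rw [hrow, pv_set_map_range _ _ _ _ hr]
    apply List.map_congr_left; intro y _
    by_cases hy : y = r
    · subst hy; rw [if_pos rfl, if_neg (lt_irrefl y), if_pos rfl]
    · rw [if_neg hy]
      by_cases hlt : y < r
      · rw [if_pos hlt, if_pos hlt]
      · rw [if_neg hlt, if_neg hlt, if_neg hy, if_neg hy]
  -- read_ptr component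
  have hptr : PySem.List.pySetD (pvPtr R C Wn banks.length r j) (B : Int)
      (PySem.List.pyGetD (pvPtr R C Wn banks.length r j) (B : Int) 0 + 1)
      = pvPtr R C Wn banks.length r (j + 1) := by
    rw [PySem.List.pySetD_natCast, PySem.List.pyGetD_natCast]
    by_cases hL : B < banks.length
    · unfold pvPtr
      rw [PySem.List.getD_map_range _ _ _ _ hL, pv_set_map_range _ _ _ _ hL]
      apply List.map_congr_left; intro b _
      rw [pvPtrVal_succ_j R C Wn r j b hR hC, ← hBdef]
      by_cases hbB : b = B
      · rw [if_pos hbB, hbB, if_pos rfl]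
      · rw [if_neg hbB, if_neg hbB, add_zero]
    · rw [List.set_eq_of_length_le (by rw [hptrlen]; omega)]
      unfold pvPtr
      apply List.map_congr_left; intro b hb
      have hbB : b ≠ B := by have := List.mem_range.mp hb; omega
      rw [pvPtrVal_succ_j R C Wn r j b hR hC, ← hBdef, if_neg hbB, add_zero]
  rw [himg, hptr]


theorem pv_img_row_done (banks : List (List Int)) (R C Hn Wn r : Nat) :
    pvImg banks R C Hn Wn r Wn = pvImg banks R C Hn Wn (r + 1) 0 := by
  unfold pvImg
  apply List.map_congr_left
  intro y _
  rcases lt_trichotomy y r with h | h | h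
  · rw [if_pos h, if_pos (by omega : y < r + 1)]
  · rw [if_neg (by omega), if_pos h, if_pos (by omega : y < r + 1)]
    apply List.map_congr_left
    intro x hx
    rw [if_pos (List.mem_range.mp hx)]
  · rw [if_neg (by omega), if_neg (by omega), if_neg (by omega : ¬ y < r + 1)]
    by_cases h2 : y = r + 1
    · rw [if_pos h2]
      have hz : ∀ x ∈ List.range Wn,
          (if x < 0 then pvVal banks R C Wn y x else (0 : Int)) = (fun _ : Nat => (0 : Int)) x := by
        intro x _; rw [if_neg (by omega)]
      rw [List.map_congr_left hz, List.map_const', List.length_range]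
    · rw [if_neg h2]

theorem pv_ptr_row_done (R C Wn L r : Nat) (hR : 0 < R) (hC : 0 < C) :
    pvPtr R C Wn L r Wn = pvPtr R C Wn L (r + 1) 0 := by
  unfold pvPtr pvPtrVal
  apply List.map_congr_left
  intro b _
  by_cases hb : b < R * C
  · have hro : b / C < R := (Nat.div_lt_iff_lt_mul hC).mpr hb
    have hbC : b % C < C := Nat.mod_lt _ hC
    rw [if_pos hb, if_pos hb, pvCnt_succ R r (b / C) hR hro, pvCnt_zero C (b % C) hbC]
    by_cases hg : b / C = r % R
    · simp only [hg, ite_self]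
      push_cast; ring
    · have hg2 : ¬ (r % R = b / C) := fun h => hg h.symm
      simp only [if_neg hg, if_neg hg2, ite_self]
      push_cast; ring
  · rw [if_neg hb, if_neg hb]

theorem pv_row (banks : List (List Int)) (R C Hn Wn r : Nat)
    (hR : 0 < R) (hC : 0 < C) (hr : r < Hn) :
    (List.range Wn).foldl (fun st (x : Nat) => pvStepA banks (R : Int) (C : Int) st (r : Int) (x : Int))
        (pvImg banks R C Hn Wn r 0, pvPtr R C Wn banks.length r 0)
      = (pvImg banks R C Hn Wn (r + 1) 0, pvPtr R C Wn banks.length (r + 1) 0) := by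
  have h := pv_foldl_range' (fun st (x : Nat) => pvStepA banks (R : Int) (C : Int) st (r : Int) (x : Int))
      (fun j => (pvImg banks R C Hn Wn r j, pvPtr R C Wn banks.length r j)) Wn 0
      (fun k _ hk2 => pv_step banks R C Hn Wn r k hR hC hr (by omega))
  simp only [Nat.zero_add] at h
  rw [List.range_eq_range', h, pv_img_row_done, pv_ptr_row_done _ _ _ _ _ hR hC]

theorem pv_img_init (banks : List (List Int)) (R C Hn Wn : Nat) :
    pvImg banks R C Hn Wn 0 0 = (List.range Hn).map (fun _ => List.replicate Wn (0 : Int)) := by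
  unfold pvImg
  apply List.map_congr_left
  intro y _
  rw [if_neg (by omega)]
  by_cases hy : y = 0
  · rw [if_pos hy]
    have hz : ∀ x ∈ List.range Wn,
        (if x < 0 then pvVal banks R C Wn y x else (0 : Int)) = (fun _ : Nat => (0 : Int)) x := by
      intro x _; rw [if_neg (by omega)]
    rw [List.map_congr_left hz, List.map_const', List.length_range]
  · rw [if_neg hy]

theorem pv_ptr_init (R C Wn L : Nat) (hC : 0 < C) :
    pvPtr R C Wn L 0 0 = List.replicate L (0 : Int) := by
  unfold pvPtr pvPtrVal
  have hz : ∀ b ∈ List.range L,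
      (if b < R * C then
        ((pvCnt R 0 (b / C) * pvCnt C Wn (b % C)
          + (if b / C = 0 % R then pvCnt C 0 (b % C) else 0) : Nat) : Int)
       else 0) = (fun _ : Nat => (0 : Int)) b := by
    intro b _
    by_cases hb : b < R * C
    · rw [if_pos hb, pvCnt_zero R (b / C) ((Nat.div_lt_iff_lt_mul hC).mpr hb),
          pvCnt_zero C (b % C) (Nat.mod_lt _ hC)]
      simp
    · rw [if_neg hb]
  rw [List.map_congr_left hz, List.map_const', List.length_range]

theorem pv_img_final (banks : List (List Int)) (R C Hn Wn : Nat) :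
    pvImg banks R C Hn Wn Hn 0
      = (List.range Hn).map (fun y => (List.range Wn).map (fun x => pvVal banks R C Wn y x)) := by
  unfold pvImg
  apply List.map_congr_left
  intro y hy
  rw [if_pos (List.mem_range.mp hy)]

theorem pv_A_eq (banks : List (List Int)) (H W : Int) (R C : Nat)
    (hR : 0 < R) (hC : 0 < C) :
    reconstruct_from_16banks banks H W (R : Int) (C : Int)
      = (List.range H.toNat).map (fun y =>
          (List.range W.toNat).map (fun x => pvVal banks R C W.toNat y x)) := by
  unfold reconstruct_from_16banks
  simp only [PySem.List.pyRange_one, Int.sub_zero, zero_add, List.foldl_map, List.map_map,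
    Function.comp_def]
  have h := pv_foldl_range'
      (fun st (y : Nat) =>
        List.foldl (fun st (x : Nat) => pvStepA banks (R : Int) (C : Int) st (y : Int) (x : Int))
          st (List.range W.toNat))
      (fun r => (pvImg banks R C H.toNat W.toNat r 0, pvPtr R C W.toNat banks.length r 0))
      H.toNat 0
      (fun k _ hk2 => pv_row banks R C H.toNat W.toNat k hR hC (by omega))
  simp only [Nat.zero_add] at h
  rw [← List.range_eq_range'] at h
  rw [← pv_img_init banks R C H.toNat W.toNat, ← pv_ptr_init R C W.toNat banks.length hC,
      h, pv_img_final]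

theorem pv_B_eq (banks : List (List Int)) (H W : Int) (R C : Nat)
    (_hR : 0 < R) (hC : 0 < C) :
    reconstruct_from_16banks_alt banks H W (R : Int) (C : Int)
      = (List.range H.toNat).map (fun y =>
          (List.range W.toNat).map (fun x => pvVal banks R C W.toNat y x)) := by
  unfold reconstruct_from_16banks_alt
  simp only [PySem.List.pyRange_one, Int.sub_zero, zero_add, List.map_map, Function.comp_def]
  apply List.map_congr_left
  intro y _
  apply List.map_congr_left
  intro x hx
  have hx' : x < W.toNat := List.mem_range.mp hx
  rw [PySem.Int.mod_natCast, PySem.Int.mod_natCast, PySem.Int.floordiv_natCast,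
      PySem.Int.floordiv_natCast]
  have e : (W - ((x % C : Nat) : Int) + (C : Int) - 1)
      = ((W.toNat + C - 1 - x % C : Nat) : Int) := by
    have h1 : x % C ≤ x := Nat.mod_le _ _
    omega
  rw [e, PySem.Int.floordiv_natCast]
  have hcast : ((y % R : Nat) : Int) * (C : Int) + ((x % C : Nat) : Int)
      = ((y % R * C + x % C : Nat) : Int) := by push_cast; ring
  rw [hcast, PySem.List.pyGetD_natCast]
  have hidx : ((y / R : Nat) : Int) * (((W.toNat + C - 1 - x % C) / C : Nat) : Int)
        + ((x / C : Nat) : Int)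
      = ((y / R * pvCnt C W.toNat (x % C) + x / C : Nat) : Int) := by
    unfold pvCnt; push_cast; ring
  rw [hidx, PySem.List.pyGetD_natCast]
  rfl

theorem pv_trivial (banks : List (List Int)) (H W br bc : Int) (h : H ≤ 0 ∨ W ≤ 0) :
    reconstruct_from_16banks banks H W br bc = reconstruct_from_16banks_alt banks H W br bc := by
  rcases h with h | h
  · have e : PySem.List.pyRange 0 H 1 = [] := PySem.List.pyRange_one_eq_nil (by omega)
    simp only [reconstruct_from_16banks, reconstruct_from_16banks_alt, e, List.map_nil,
      List.foldl_nil]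
  · have e : PySem.List.pyRange 0 W 1 = [] := PySem.List.pyRange_one_eq_nil (by omega)
    simp only [reconstruct_from_16banks, reconstruct_from_16banks_alt, e, List.map_nil,
      List.foldl_nil]
    have fix : ∀ (l : List Int) (st : List (List Int) × List Int),
        List.foldl (fun st _ => st) st l = st := by
      intro l
      induction l with
      | nil => intro st; rfl
      | cons a l ih => intro st; simp only [List.foldl_cons]; exact ih st
    rw [fix]
    have hW : W.toNat = 0 := by omega
    simp [hW]

-- ===== VERDICT (by name: the statement is the Claim_ definition above) =====
theorem reconstruct_from_16banks_spec : Claim_equal_reconstruct_from_16banks := by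
  intro banks H W br bc _hdom hpre
  unfold Spec_reconstruct_from_16banks
  by_cases hHW : 0 < H ∧ 0 < W
  · obtain ⟨hbr, hbc, -⟩ := hpre hHW
    have hbr' : br = ((br.toNat : Nat) : Int) := (Int.toNat_of_nonneg (le_of_lt hbr)).symm
    have hbc' : bc = ((bc.toNat : Nat) : Int) := (Int.toNat_of_nonneg (le_of_lt hbc)).symm
    rw [hbr', hbc',
        pv_A_eq banks H W br.toNat bc.toNat (by omega) (by omega),
        pv_B_eq banks H W br.toNat bc.toNat (by omega) (by omega)]
  · exact pv_trivial banks H W br bc (by omega)
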